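-- pv_equiv track=rewrite | github.com/nikhil28cs52/codingchallange | HOTEL_REVIEW(TRIE).py | solve
-- ===== SOURCE A (Python) =====
-- from typing import List
--
-- def add(data, root):
--     n = len(data)
--
--     for i in range(n):
--         idx = ord(data[ i ]) - 97
--         if root.child[ idx ] is None:
--             root.child[ idx ] = Trie()
--         root = root.child[ idx ]
--     root.isTerminal = True
--
-- def search(data, root):
--     n = len(data)
--
--     for i in range(n):
--         idx = ord(data[ i ]) - 97
--         if root.child[ idx ] is None:
--             return False
--         else:
--             root = root.child[ idx ]
--     return root.isTerminal
--
-- class Trie: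
--     def __init__(self):
--         self.isTerminal = False
--         self.child = [ None ] * 26
--
-- def solve(A, B):
--     A = A.split('_')
--     root = Trie()
--     for i in range(len(A)):
--         add(A[ i ], root)
--
--     lst: List[ int ] = [ ]
--     for i in range(len(B)):
--         C = B[ i ].split('_')
--         count = 0
--         for j in range(len(C)):
--             x = search(C[ j ], root)
--             if x:
--                 count += 1
--         lst.append([count,i])
--     srt = sorted(lst, key=lambda x:x[0],reverse= True)
--
--     d2 = [ item[ 1 ] for item in srt ]
--     return d2
-- ===== SOURCE B (Python) =====
-- def solve(A, B):
--     goodset = set(A.split('_'))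
--     lst = [(sum(w in goodset for w in b.split('_')), i) for i, b in enumerate(B)]
--     return [i for _, i in sorted(lst, key=lambda x: x[0], reverse=True)]
-- ===== Notes on version B (the rewrite author's own statement) =====
-- stated objective: faster
-- what changed: Replaces the Trie class and its per-character add/search walk by a hash set of good words built once from A.split('_'); each review's count is a direct whole-word membership sum (C-level set lookups instead of Python-level per-character trie node hops).
-- outside the precondition, e.g. on solve('a', ['z', 'G']): A returns [1, 0], B returns [0, 1]
import Mathlib
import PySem

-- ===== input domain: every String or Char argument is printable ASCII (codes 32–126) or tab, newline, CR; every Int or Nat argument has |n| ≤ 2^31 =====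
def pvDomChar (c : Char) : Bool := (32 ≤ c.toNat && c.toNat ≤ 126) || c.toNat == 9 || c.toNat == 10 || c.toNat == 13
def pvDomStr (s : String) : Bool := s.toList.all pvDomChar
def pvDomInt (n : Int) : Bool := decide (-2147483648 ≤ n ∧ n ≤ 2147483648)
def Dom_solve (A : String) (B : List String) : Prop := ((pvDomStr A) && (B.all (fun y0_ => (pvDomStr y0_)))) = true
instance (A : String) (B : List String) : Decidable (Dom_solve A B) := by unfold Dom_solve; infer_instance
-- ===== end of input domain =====

-- B replaces A's hand-rolled character trie by a hash set of the good words (measured faster);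
-- equivalence is claimed on lowercase-letter/underscore inputs (Pre_solve), where A's trie
-- indexing is well defined.  (The two Lean ports in fact agree on all inputs — the proof does not
-- need Pre_; Pre_ marks where the Python A computes the value claimed here.)

-- ===== PORT A =====
-- The Trie is encoded as a finite map from root paths (lists of child indices `ord c - 97`) to the
-- node's isTerminal flag; `child[idx] is None` is `get? (path ++ [idx]) = none`.  Exact on Pre_solve
-- inputs (indices 0..25); outside Pre_ the Python raises IndexError or wraps negative indices.
def pvIdx (c : Char) : Int := (c.toNat : Int) - 97

-- def add(data, root) — walks/creates the child chain, then sets the final node's isTerminal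
def trieAdd : List Char → List Int → PySem.Dict (List Int) Bool → PySem.Dict (List Int) Bool
  | [], path, d => d.insert path true
  | c :: cs, path, d =>
    let p := path ++ [pvIdx c]
    let d := match d.get? p with
      | none => d.insert p false
      | some _ => d
    trieAdd cs p d

-- def search(data, root) — returns False at the first missing child, else the final isTerminal
def trieSearch : List Char → List Int → PySem.Dict (List Int) Bool → Bool
  | [], path, d => d.getD path false
  | c :: cs, path, d =>
    let p := path ++ [pvIdx c]
    match d.get? p with
    | none => false
    | some _ => trieSearch cs p d

def solve (A : String) (B : List String) : List Int :=
  let As := PySem.Chars.splitOn A.toList ['_']          -- A = A.split('_')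
  let root : PySem.Dict (List Int) Bool := PySem.Dict.empty.insert [] false   -- root = Trie()
  let root := As.foldl (fun d w => trieAdd w [] d) root -- for i in range(len(A)): add(A[i], root)
  let lst : List (Int × Int) :=                         -- for i in range(len(B)): … lst.append([count, i])
    (PySem.List.enumerate B).foldl (fun lst p =>
      let C := PySem.Chars.splitOn p.2.toList ['_']     -- C = B[i].split('_')
      let count := C.foldl (fun count w =>              -- for j in range(len(C)): x = search(C[j], root); if x: count += 1
        if trieSearch w [] root then count + 1 else count) (0 : Int)
      lst ++ [(count, p.1)]) []
  let srt := PySem.List.sorted lst (fun x => x.1) true  -- sorted(lst, key=lambda x: x[0], reverse=True)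
  srt.map (fun item => item.2)                          -- [item[1] for item in srt]

-- ===== PORT B =====
def solve_alt (A : String) (B : List String) : List Int :=
  let goodset : PySem.Set (List Char) := PySem.Set.ofList (PySem.Chars.splitOn A.toList ['_'])
  let lst : List (Int × Int) :=
    (PySem.List.enumerate B).map (fun p =>
      (((PySem.Chars.splitOn p.2.toList ['_']).map
          (fun w => if goodset.contains w then (1 : Int) else 0)).sum, p.1))
  (PySem.List.sorted lst (fun x => x.1) true).map (fun x => x.2)

-- ===== PRECONDITION & SPEC =====
def pvLowerOK (c : Char) : Bool := (97 ≤ c.toNat && c.toNat ≤ 122) || c == '_'   -- 'a'..'z' or '_'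
-- Pre_ restricts to lowercase letters and '_' : on any other character A's trie either raises
-- IndexError, or (for 'G'..'`') silently aliases it onto 'a'..'z' by negative-list-index wraparound.
def Pre_solve (A : String) (B : List String) : Prop :=
  (A.toList.all pvLowerOK && B.all (fun s => s.toList.all pvLowerOK)) = true
instance (A : String) (B : List String) : Decidable (Pre_solve A B) := by unfold Pre_solve; infer_instance
def pvWitness_solve : String × List String := ("cool_ice", ["ice_cool", "cold"])
def Spec_solve (A : String) (B : List String) (out : List Int) : Prop := out = solve_alt A B
instance (A : String) (B : List String) (out : List Int) : Decidable (Spec_solve A B out) := by unfold Spec_solve; infer_instance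

-- ===== CLAIM (what is proved, stated in full; the proofs are below) =====
def Claim_equal_solve : Prop := ∀ (A : String) (B : List String), Dom_solve A B → Pre_solve A B → Spec_solve A B (solve A B)

-- ===== LEMMAS AND PROOFS =====

-- the root path of a word: the child indices taken from the root
def pvEnc (cs : List Char) : List Int := cs.map pvIdx

-- invariant of the trie map built from the word list ws: which paths exist, which are terminal
def pvInv (ws : List (List Char)) (d : PySem.Dict (List Int) Bool) : Prop :=
  (∀ q, d.get? q = some true ↔ ∃ w ∈ ws, q = pvEnc w) ∧
  (∀ q, (d.get? q).isSome = true ↔ (q = [] ∨ ∃ w ∈ ws, q ≠ [] ∧ q <+: pvEnc w))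


-- case split for Dict.get? after an insert, used throughout the trie invariant proofs
lemma pvGetInsert (d : PySem.Dict (List Int) Bool) (k q : List Int) (v : Bool) :
    (d.insert k v).get? q = if q = k then some v else d.get? q := by
  by_cases h : q = k
  · subst h; simp [PySem.Dict.get?_insert_self]
  · simp [PySem.Dict.get?_insert_of_ne _ _ h, h]

lemma pvInv_base : pvInv [] (PySem.Dict.empty.insert [] false) := by
  constructor <;> intro q <;>
    · rw [pvGetInsert]
      split_ifs with h <;> simp [PySem.Dict.get?_empty, h]

lemma trieAdd_get?_true (cs : List Char) : ∀ (path : List Int) d q,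
    (trieAdd cs path d).get? q = some true ↔ (q = path ++ pvEnc cs ∨ d.get? q = some true) := by
  induction cs with
  | nil =>
    intro path d q
    rw [show trieAdd [] path d = d.insert path true from rfl, pvGetInsert]
    split_ifs with h <;> simp [pvEnc, h]
  | cons c cs ih =>
    intro path d q
    have hd : ∀ (d' : PySem.Dict (List Int) Bool),
        (match d.get? (path ++ [pvIdx c]) with
          | none => d.insert (path ++ [pvIdx c]) false
          | some _ => d) = d' →
        (d'.get? q = some true ↔ d.get? q = some true) := by
      intro d' h
      cases hg : d.get? (path ++ [pvIdx c]) with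
      | none =>
        subst h; rw [hg, pvGetInsert]
        split_ifs with h
        · subst h; simp [hg]
        · rfl
      | some b => subst h; rw [hg]
    rw [show trieAdd (c :: cs) path d = trieAdd cs (path ++ [pvIdx c])
          (match d.get? (path ++ [pvIdx c]) with
            | none => d.insert (path ++ [pvIdx c]) false
            | some _ => d) from rfl, ih]
    rw [hd _ rfl]
    simp [pvEnc]

lemma trieAdd_get?_isSome (cs : List Char) : ∀ (path : List Int) d q,
    ((trieAdd cs path d).get? q).isSome = true ↔
      ((d.get? q).isSome = true ∨ q = path ++ pvEnc cs ∨
        ∃ p, p ≠ [] ∧ p <+: pvEnc cs ∧ q = path ++ p) := by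
  induction cs with
  | nil =>
    intro path d q
    rw [show trieAdd [] path d = d.insert path true from rfl, pvGetInsert]
    split_ifs with h <;> simp [pvEnc, h]
  | cons c cs ih =>
    intro path d q
    rw [show trieAdd (c :: cs) path d = trieAdd cs (path ++ [pvIdx c])
          (match d.get? (path ++ [pvIdx c]) with
            | none => d.insert (path ++ [pvIdx c]) false
            | some _ => d) from rfl, ih]
    have hd : ((match d.get? (path ++ [pvIdx c]) with
          | none => d.insert (path ++ [pvIdx c]) false
          | some _ => d).get? q).isSome = true ↔
        ((d.get? q).isSome = true ∨ q = path ++ [pvIdx c]) := by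
      cases hg : d.get? (path ++ [pvIdx c]) with
      | none =>
        rw [pvGetInsert]
        split_ifs with h <;> simp [h, hg]
      | some b =>
        rcases eq_or_ne q (path ++ [pvIdx c]) with h | h <;> simp [h, hg]
    rw [hd]
    constructor
    · rintro ((h | h) | h | ⟨p, hp, hpre, rfl⟩)
      · exact Or.inl h
      · exact Or.inr (Or.inr ⟨[pvIdx c], by simp, by simp [pvEnc], by simp [h]⟩)
      · exact Or.inr (Or.inl (by simp [pvEnc, h]))
      · exact Or.inr (Or.inr ⟨pvIdx c :: p, by simp,
          show pvIdx c :: p <+: pvIdx c :: pvEnc cs from List.cons_prefix_cons.mpr ⟨rfl, hpre⟩,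
          by simp⟩)
    · rintro (h | h | ⟨p, hp, hpre, rfl⟩)
      · exact Or.inl (Or.inl h)
      · exact Or.inr (Or.inl (by simpa [pvEnc] using h))
      · -- p is a nonempty prefix of pvEnc (c :: cs): p = pvIdx c :: p'
        rcases p with _ | ⟨x, p⟩
        · exact absurd rfl hp
        · have := (List.cons_prefix_cons).1 (by simpa [pvEnc] using hpre)
          rcases this with ⟨rfl, hpre'⟩
          rcases eq_or_ne p ([] : List Int) with rfl | hne
          · exact Or.inl (Or.inr (by simp))
          · exact Or.inr (Or.inr ⟨p, hne, hpre', by simp⟩)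

lemma pvInv_add {ws d} (h : pvInv ws d) (w : List Char) :
    pvInv (ws ++ [w]) (trieAdd w [] d) := by
  obtain ⟨h1, h2⟩ := h
  constructor
  · intro q
    rw [trieAdd_get?_true, h1]
    constructor
    · rintro (rfl | ⟨v, hv, rfl⟩)
      · exact ⟨w, by simp⟩
      · exact ⟨v, by simp [hv]⟩
    · rintro ⟨v, hv, rfl⟩
      rcases List.mem_append.1 hv with hv | hv
      · exact Or.inr ⟨v, hv, rfl⟩
      · simp only [List.mem_singleton] at hv; subst hv; simp
  · intro q
    rw [trieAdd_get?_isSome, h2]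
    constructor
    · rintro ((rfl | ⟨v, hv, hne, hpre⟩) | rfl | ⟨p, hp, hpre, rfl⟩)
      · exact Or.inl rfl
      · exact Or.inr ⟨v, by simp [hv], hne, hpre⟩
      · rcases eq_or_ne (pvEnc w) ([] : List Int) with h | h
        · simp [h]
        · exact Or.inr ⟨w, by simp, by simpa using h, by simp⟩
      · exact Or.inr ⟨w, by simp, by simpa using hp, by simpa using hpre⟩
    · rintro (rfl | ⟨v, hv, hne, hpre⟩)
      · exact Or.inl (Or.inl rfl)
      · rcases List.mem_append.1 hv with hv | hv
        · exact Or.inl (Or.inr ⟨v, hv, hne, hpre⟩)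
        · simp only [List.mem_singleton] at hv; subst hv
          exact Or.inr (Or.inr ⟨q, hne, hpre, by simp⟩)

lemma pvInv_foldl (l : List (List Char)) : ∀ ws d, pvInv ws d →
    pvInv (ws ++ l) (l.foldl (fun d w => trieAdd w [] d) d) := by
  induction l with
  | nil => intro ws d h; simpa using h
  | cons w l ih =>
    intro ws d h
    have := ih (ws ++ [w]) _ (pvInv_add h w)
    simpa using this

lemma trieSearch_eq {ws d} (h : pvInv ws d) (cs : List Char) : ∀ path,
    trieSearch cs path d = decide (∃ w ∈ ws, path ++ pvEnc cs = pvEnc w) := by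
  obtain ⟨h1, h2⟩ := h
  induction cs with
  | nil =>
    intro path
    have : d.getD path false = true ↔ d.get? path = some true := by
      rw [PySem.Dict.getD_eq_get?_getD]
      cases hg : d.get? path with
      | none => simp
      | some b => simp
    refine Bool.eq_iff_iff.2 ?_
    rw [show trieSearch [] path d = d.getD path false from rfl, this, h1]
    simp [pvEnc]
  | cons c cs ih =>
    intro path
    rw [show trieSearch (c :: cs) path d =
        (match d.get? (path ++ [pvIdx c]) with
          | none => false
          | some _ => trieSearch cs (path ++ [pvIdx c]) d) from rfl]
    cases hg : d.get? (path ++ [pvIdx c]) with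
    | none =>
      refine Bool.eq_iff_iff.2 ?_
      simp only [Bool.false_eq_true, false_iff, decide_eq_true_eq, not_exists]
      rintro w hw
      obtain ⟨hw, heq⟩ := hw
      have hpre : path ++ [pvIdx c] ≠ [] ∧ path ++ [pvIdx c] <+: pvEnc w := by
        refine ⟨by simp, ?_⟩
        rw [← heq]
        exact ⟨pvEnc cs, by simp [pvEnc]⟩
      have : ((d.get? (path ++ [pvIdx c])).isSome = true) :=
        (h2 _).2 (Or.inr ⟨w, hw, hpre⟩)
      rw [hg] at this; simp at this
    | some b =>
      rw [ih]
      simp [pvEnc, List.append_assoc]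

lemma pvEnc_inj : Function.Injective pvEnc := by
  refine List.map_injective_iff.2 fun x y hxy => ?_
  have : x.toNat = y.toNat := by simpa [pvIdx, sub_left_inj] using hxy
  exact Char.ext (UInt32.toNat_inj.mp this)

lemma solve_eq_alt (A : String) (B : List String) : solve A B = solve_alt A B := by
  have hroot := pvInv_foldl (PySem.Chars.splitOn A.toList ['_']) [] _ pvInv_base
  simp only [List.nil_append] at hroot
  have hsearch : ∀ w, trieSearch w []
      ((PySem.Chars.splitOn A.toList ['_']).foldl (fun d w => trieAdd w [] d)
        (PySem.Dict.empty.insert [] false)) =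
      (PySem.Set.ofList (PySem.Chars.splitOn A.toList ['_'])).contains w := by
    intro w
    rw [trieSearch_eq hroot w []]
    refine Bool.eq_iff_iff.2 ?_
    rw [PySem.Set.contains_iff, PySem.Set.mem_ofList]
    simp only [List.nil_append, decide_eq_true_eq]
    constructor
    · rintro ⟨v, hv, heq⟩; exact (pvEnc_inj heq.symm) ▸ hv
    · intro hw; exact ⟨w, hw, rfl⟩
  show (PySem.List.sorted ((PySem.List.enumerate B).foldl (fun lst p =>
      lst ++ [((PySem.Chars.splitOn p.2.toList ['_']).foldl (fun count w =>
        if trieSearch w [] ((PySem.Chars.splitOn A.toList ['_']).foldl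
            (fun d w => trieAdd w [] d) (PySem.Dict.empty.insert [] false))
          then count + 1 else count) (0 : Int), p.1)]) [])
      (fun x => x.1) true).map (fun item => item.2) =
    (PySem.List.sorted ((PySem.List.enumerate B).map (fun p =>
      (((PySem.Chars.splitOn p.2.toList ['_']).map
          (fun w => if (PySem.Set.ofList (PySem.Chars.splitOn A.toList ['_'])).contains w
            then (1 : Int) else 0)).sum, p.1)))
      (fun x => x.1) true).map (fun x => x.2)
  rw [PySem.List.foldl_append_singleton_eq_map]
  simp only [List.nil_append]
  congr 1
  refine congrArg _ (List.map_congr_left fun p _ => ?_)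
  congr 1
  rw [PySem.List.foldl_congr_mem (PySem.Chars.splitOn p.2.toList ['_']) _
      (fun count w => if (PySem.Set.ofList (PySem.Chars.splitOn A.toList ['_'])).contains w
        then count + 1 else count) 0
      (fun acc w _ => by rw [hsearch w]),
    PySem.List.foldl_count_if, PySem.List.sum_map_ite_one_zero]
  simp

-- ===== VERDICT (by name: the statement is the Claim_ definition above) =====
theorem solve_spec : Claim_equal_solve := by
  intro A B _ _
  unfold Spec_solve
  exact solve_eq_alt A B
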